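-- pv_equiv track=rewrite | github.com/spacemanidol/UWLING | 570-Shallow Methods in Natural Language Processing/Assignments/hw6/create_3gram_hmm.py | convert_ngram
-- ===== SOURCE A (Python) =====
-- def convert_ngram(ngram):
--     pos = {}
--     for item in ngram:
--         if item[1] in pos:
--             pos[item[1]] += ngram[item]
--         else:
--             pos[item[1]] = ngram[item]
--     return pos
-- ===== SOURCE B (Python) =====
-- def convert_ngram(ngram):
--     # Two-pass: collect the distinct second elements in first-occurrence order,
--     # then build the result by summing the counts for each key.
--     order = list(dict.fromkeys(k[1] for k in ngram))
--     return {p: sum(c for k, c in ngram.items() if k[1] == p) for p in order}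
-- ===== Notes on version B (the rewrite author's own statement) =====
-- stated objective: alternative
-- what changed: Replaces the single membership-test accumulation loop over a mutable dict with a two-pass decomposition: first dedupe the second elements in first-occurrence order, then build the result dict by summing the counts per key; Pre_ only excludes association lists with duplicate (w1,w2) keys, which do not represent any Python dict input.
import Mathlib
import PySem

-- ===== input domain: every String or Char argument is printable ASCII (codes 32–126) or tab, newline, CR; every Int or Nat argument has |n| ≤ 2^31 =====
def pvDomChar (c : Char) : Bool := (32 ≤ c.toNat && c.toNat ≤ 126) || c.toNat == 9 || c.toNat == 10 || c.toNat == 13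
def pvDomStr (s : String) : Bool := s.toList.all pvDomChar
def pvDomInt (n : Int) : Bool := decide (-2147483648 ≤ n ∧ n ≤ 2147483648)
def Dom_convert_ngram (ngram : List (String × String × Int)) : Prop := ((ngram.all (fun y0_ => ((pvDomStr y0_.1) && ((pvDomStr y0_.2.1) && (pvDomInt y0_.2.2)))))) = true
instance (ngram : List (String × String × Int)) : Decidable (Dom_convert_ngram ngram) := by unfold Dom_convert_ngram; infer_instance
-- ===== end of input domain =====

-- B replaces A's single membership-test accumulation loop by a two-pass decomposition
-- (dedupe the second elements, then sum the counts per key); 'alternative', not faster.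

-- ===== PORT A =====
-- A iterates the input dict's keys, accumulating ngram[item] into pos[item[1]].
def convert_ngram (ngram : List (String × String × Int)) : List (String × Int) :=
  (ngram.foldl
    (fun pos item =>
      match pos.get? item.2.1 with
      | some v => pos.insert item.2.1 (v + item.2.2)
      | none   => pos.insert item.2.1 item.2.2)
    (PySem.Dict.empty : PySem.Dict String Int)).items

-- ===== PORT B =====
def convert_ngram_alt (ngram : List (String × String × Int)) : List (String × Int) :=
  (PySem.List.dedup (ngram.map (fun t => t.2.1))).map
    (fun p => (p, ((ngram.filter (fun t => t.2.1 == p)).map (fun t => t.2.2)).sum))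

-- ===== PRECONDITION & SPEC =====
-- Pre_ excludes association lists with duplicate dict keys (first two components): such a list
-- does not represent any Python dict (the dict constructor merges the duplicates), so the
-- list-level behaviour there is an artefact of the representation, not of either program.
def Pre_convert_ngram (ngram : List (String × String × Int)) : Prop :=
  (ngram.map (fun t => (t.1, t.2.1))).Nodup
instance (ngram : List (String × String × Int)) : Decidable (Pre_convert_ngram ngram) := by
  unfold Pre_convert_ngram; infer_instance

def pvWitness_convert_ngram : (List (String × String × Int)) :=
  [("a", "b", 1), ("c", "b", 3), ("c", "d", -2)]

def Spec_convert_ngram (ngram : List (String × String × Int)) (out : List (String × Int)) : Prop := out = convert_ngram_alt ngram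
instance (ngram : List (String × String × Int)) (out : List (String × Int)) : Decidable (Spec_convert_ngram ngram out) := by unfold Spec_convert_ngram; infer_instance

-- ===== CLAIM (what is proved, stated in full; the proofs are below) =====
def Claim_equal_convert_ngram : Prop := ∀ (ngram : List (String × String × Int)), Dom_convert_ngram ngram → Pre_convert_ngram ngram → Spec_convert_ngram ngram (convert_ngram ngram)

-- ===== LEMMAS AND PROOFS =====

-- A's loop body is an insert at key item.2.1 (unifies the two branches into one insert).
theorem convert_ngram_step_eq (pos : PySem.Dict String Int) (item : String × String × Int) :
    (match pos.get? item.2.1 with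
      | some v => pos.insert item.2.1 (v + item.2.2)
      | none   => pos.insert item.2.1 item.2.2)
    = pos.insert item.2.1 (pos.getD item.2.1 0 + item.2.2) := by
  rcases h : pos.get? item.2.1 with _ | v <;>
    simp [PySem.Dict.getD_eq_get?_getD, h]

-- Value invariant of A's loop: the count stored at p grows by the matching counts of the list.
theorem convert_ngram_getD_fold (l : List (String × String × Int))
    (d : PySem.Dict String Int) (p : String) :
    (l.foldl (fun pos item => pos.insert item.2.1 (pos.getD item.2.1 0 + item.2.2)) d).getD p 0
      = d.getD p 0 + ((l.filter (fun t => t.2.1 == p)).map (fun t => t.2.2)).sum := by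
  induction l generalizing d with
  | nil => simp
  | cons x t ih =>
      simp only [List.foldl_cons, ih, List.filter_cons]
      rcases hx : (x.2.1 == p) with _ | _
      · have hne : p ≠ x.2.1 := fun h => by simp [h] at hx
        simp [PySem.Dict.getD_insert, hne]
      · have he : p = x.2.1 := (beq_iff_eq.mp hx).symm
        simp [he.symm]
        ring

theorem convert_ngram_eq_alt (ngram : List (String × String × Int)) :
    convert_ngram ngram = convert_ngram_alt ngram := by
  unfold convert_ngram convert_ngram_alt
  have hstep :
      ngram.foldl
        (fun pos item =>
          match pos.get? item.2.1 with
          | some v => pos.insert item.2.1 (v + item.2.2)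
          | none   => pos.insert item.2.1 item.2.2)
        (PySem.Dict.empty : PySem.Dict String Int)
      = ngram.foldl
          (fun pos item => pos.insert item.2.1 (pos.getD item.2.1 0 + item.2.2))
          (PySem.Dict.empty : PySem.Dict String Int) :=
    PySem.List.foldl_congr_mem _ _ _ _ (fun acc x _ => convert_ngram_step_eq acc x)
  rw [hstep]
  set d := ngram.foldl
      (fun pos item => pos.insert item.2.1 (pos.getD item.2.1 0 + item.2.2))
      (PySem.Dict.empty : PySem.Dict String Int) with hd
  have hkeys : d.keys = PySem.List.dedup (ngram.map (fun t => t.2.1)) := by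
    rw [hd, PySem.Dict.keys_foldl_insert_key ngram (fun t => t.2.1)
        (fun pos item => pos.getD item.2.1 0 + item.2.2) PySem.Dict.empty]
    simp [PySem.Dict.keys_empty, PySem.List.dedup_eq_ofList, PySem.Set.update,
      PySem.Set.ofList_eq_foldl]
  have hnd : d.keys.Nodup := by
    rw [hkeys]; exact PySem.List.nodup_dedup _
  rw [PySem.Dict.items_eq_map_keys d hnd 0, hkeys]
  refine List.map_congr_left (fun p _ => ?_)
  rw [hd, convert_ngram_getD_fold]
  simp

-- ===== VERDICT (by name: the statement is the Claim_ definition above) =====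
theorem convert_ngram_spec : Claim_equal_convert_ngram := by
  intro ngram _ _
  exact convert_ngram_eq_alt ngram
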